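-- pv_equiv track=rewrite | github.com/mnazaal/cstree-alg | code/utils/tools.py | nodes_per_tree
-- ===== SOURCE A (Python) =====
-- def nodes_per_tree(val_dict, ordering, include_last=False):
--     assert len(val_dict)==len(ordering)
--
--     # nodes per each level
--     nodes=[]
--     nodes.append(len(val_dict[ordering[0]]))
--
--     levels = len(ordering)
--
--     if not include_last:
--         levels-=1
--
--     for i in range(1,levels):
--         nodes.append(nodes[i-1]*len(val_dict[ordering[i]]))
--
--     return sum(nodes)
-- ===== SOURCE B (Python) =====
-- def nodes_per_tree(val_dict, ordering, include_last=False):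
--     levels = len(ordering) if include_last else len(ordering) - 1
--     cards = [len(val_dict[ordering[i]]) for i in range(max(1, levels))]
--     total = 0
--     for c in reversed(cards):
--         total = c * (1 + total)
--     return total
-- ===== Notes on version B (the rewrite author's own statement) =====
-- stated objective: alternative
-- what changed: Replaces A's forward construction of a list of prefix products (with an indexed lookup into the growing list) and a final sum by a reversed Horner fold over the per-level cardinalities with a single scalar accumulator.
import Mathlib
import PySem

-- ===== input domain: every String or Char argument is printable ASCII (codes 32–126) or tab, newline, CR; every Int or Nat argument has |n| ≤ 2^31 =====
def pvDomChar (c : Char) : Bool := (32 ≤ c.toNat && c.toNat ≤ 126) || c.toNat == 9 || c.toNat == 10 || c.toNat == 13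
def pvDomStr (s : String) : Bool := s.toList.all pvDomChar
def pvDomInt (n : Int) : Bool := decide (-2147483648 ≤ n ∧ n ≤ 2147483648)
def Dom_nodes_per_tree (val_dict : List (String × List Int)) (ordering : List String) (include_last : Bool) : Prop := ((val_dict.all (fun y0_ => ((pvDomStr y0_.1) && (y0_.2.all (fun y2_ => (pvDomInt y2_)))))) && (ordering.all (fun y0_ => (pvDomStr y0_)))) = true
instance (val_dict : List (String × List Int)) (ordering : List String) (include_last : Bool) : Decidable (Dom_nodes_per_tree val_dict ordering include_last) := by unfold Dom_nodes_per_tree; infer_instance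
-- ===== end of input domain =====

-- B replaces A's forward list of prefix products (with indexed lookup) by a reversed Horner fold
-- with one scalar accumulator; same O(n) cost, different decomposition.


-- ===== PORT A =====
-- len(val_dict[k]) is ported as ((d.get? k).getD []).length; the [] default is only reachable
-- outside Pre_ (where Python raises KeyError).
def nodes_per_tree (val_dict : List (String × List Int)) (ordering : List String) (include_last : Bool) : Int :=
  let d := PySem.Dict.ofList val_dict
  let nodes : List Int := []
  let nodes := nodes ++ [(((d.get? (PySem.List.pyGetD ordering 0 "")).getD []).length : Int)]
  let levels : Int := (ordering.length : Int)
  let levels := if !include_last then levels - 1 else levels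
  let nodes := (PySem.List.pyRange 1 levels 1).foldl
    (fun nodes i => nodes ++ [PySem.List.pyGetD nodes (i - 1) 0 * (((d.get? (PySem.List.pyGetD ordering i "")).getD []).length : Int)]) nodes
  nodes.sum

-- ===== PORT B =====
def nodes_per_tree_alt (val_dict : List (String × List Int)) (ordering : List String) (include_last : Bool) : Int :=
  let d := PySem.Dict.ofList val_dict
  let levels : Int := if include_last then (ordering.length : Int) else (ordering.length : Int) - 1
  let cards := (PySem.List.pyRange 0 (max 1 levels) 1).map
    (fun i => (((d.get? (PySem.List.pyGetD ordering i "")).getD []).length : Int))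
  cards.reverse.foldl (fun total c => c * (1 + total)) 0

-- ===== PRECONDITION & SPEC =====
-- Pre_ excludes exactly the inputs where the Python A raises: the failed assert
-- (dict size ≠ len(ordering)), the IndexError on empty ordering, and a KeyError
-- on a level variable missing from val_dict.
def Pre_nodes_per_tree (val_dict : List (String × List Int)) (ordering : List String) (include_last : Bool) : Prop :=
  ordering ≠ [] ∧ (PySem.Dict.ofList val_dict).size = ordering.length ∧
  ∀ s ∈ ordering.take (max 1 (if include_last then ordering.length else ordering.length - 1)),
    (PySem.Dict.ofList val_dict).contains s = true
instance (val_dict : List (String × List Int)) (ordering : List String) (include_last : Bool) : Decidable (Pre_nodes_per_tree val_dict ordering include_last) := by unfold Pre_nodes_per_tree; infer_instance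

def pvWitness_nodes_per_tree : (List (String × List Int)) × List String × Bool :=
  ([("a", [0, 1]), ("b", [0, 1, 2])], ["a", "b"], true)

def Spec_nodes_per_tree (val_dict : List (String × List Int)) (ordering : List String) (include_last : Bool) (out : Int) : Prop := out = nodes_per_tree_alt val_dict ordering include_last
instance (val_dict : List (String × List Int)) (ordering : List String) (include_last : Bool) (out : Int) : Decidable (Spec_nodes_per_tree val_dict ordering include_last out) := by unfold Spec_nodes_per_tree; infer_instance

-- ===== CLAIM (what is proved, stated in full; the proofs are below) =====
def Claim_equal_nodes_per_tree : Prop := ∀ (val_dict : List (String × List Int)) (ordering : List String) (include_last : Bool), Dom_nodes_per_tree val_dict ordering include_last → Pre_nodes_per_tree val_dict ordering include_last → Spec_nodes_per_tree val_dict ordering include_last (nodes_per_tree val_dict ordering include_last)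

-- ===== LEMMAS AND PROOFS =====

-- the list A builds: nodes[k] = product of the first k+1 cardinalities
lemma nodesList (f : Int → Int) (M : Nat) :
    (PySem.List.pyRange 1 (1 + (M : Int)) 1).foldl
      (fun nodes i => nodes ++ [PySem.List.pyGetD nodes (i - 1) 0 * f i]) [f 0]
    = (List.range (M + 1)).map (fun (k : Nat) => ((List.range (k + 1)).map (fun (j : Nat) => f (j : Int))).prod) := by
  induction M with
  | zero => simp [PySem.List.pyRange_one_eq_nil]
  | succ M ih =>
    have hsplit : PySem.List.pyRange 1 (1 + ((M + 1 : Nat) : Int)) 1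
        = PySem.List.pyRange 1 (1 + (M : Int)) 1 ++ [1 + (M : Int)] := by
      have := PySem.List.pyRange_one_succ_right (a := 1) (b := 1 + (M : Int)) (by omega)
      push_cast
      rw [show (1 : Int) + ((M : Int) + 1) = (1 + (M : Int)) + 1 by ring, this]
    rw [hsplit, List.foldl_append, ih]
    have hlen : ((List.range (M + 1)).map (fun (k : Nat) => ((List.range (k + 1)).map (fun (j : Nat) => f (j : Int))).prod)).length = M + 1 := by
      simp
    have hget : PySem.List.pyGetD
        ((List.range (M + 1)).map (fun (k : Nat) => ((List.range (k + 1)).map (fun (j : Nat) => f (j : Int))).prod))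
        ((1 + (M : Int)) - 1) 0
        = ((List.range (M + 1)).map (fun (j : Nat) => f (j : Int))).prod := by
      rw [show (1 + (M : Int)) - 1 = ((M : Nat) : Int) by ring, PySem.List.pyGetD_natCast]
      rw [List.getD_eq_getElem _ _ (by simp)]
      simp
    simp only [List.foldl_cons, List.foldl_nil, hget]
    rw [show (M + 1) + 1 = (M + 2) by ring, List.range_succ (n := M + 1), List.map_append]
    simp only [List.map_cons, List.map_nil]
    congr 1
    rw [List.range_succ (n := M + 1), List.map_append, List.prod_append]
    simp only [List.map_cons, List.map_nil, List.prod_cons, List.prod_nil, mul_one]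
    rw [show (1 : Int) + (M : Int) = ((M + 1 : Nat) : Int) from by push_cast; ring]

-- sum of the prefix products = Horner's rule from the back
lemma sumPP (M : Nat) (f : Int → Int) :
    ((List.range (M + 1)).map (fun (k : Nat) => ((List.range (k + 1)).map (fun (j : Nat) => f (j : Int))).prod)).sum
    = ((List.range (M + 1)).map (fun (k : Nat) => f (k : Int))).foldr (fun c t => c * (1 + t)) 0 := by
  induction M generalizing f with
  | zero => simp
  | succ M ih =>
    have hr : List.range (M + 2) = 0 :: (List.range (M + 1)).map (· + 1) := by
      rw [List.range_succ_eq_map]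
    rw [show (M + 1) + 1 = M + 2 by ring, hr]
    simp only [List.map_cons, List.map_map, List.sum_cons, List.foldr_cons]
    have hP : ∀ k : Nat, ((List.range ((k + 1) + 1)).map (fun (j : Nat) => f (j : Int))).prod
        = f 0 * ((List.range (k + 1)).map (fun (j : Nat) => f ((j : Int) + 1))).prod := by
      intro k
      rw [show (k + 1) + 1 = (k + 1) + 1 by rfl, List.range_succ_eq_map]
      simp only [List.map_cons, List.map_map, List.prod_cons]
      congr 1
    have ih' := ih (fun i => f (i + 1))
    have hmap1 : ((List.range (M + 1)).map ((fun (k : Nat) => ((List.range (k + 1)).map (fun (j : Nat) => f (j : Int))).prod) ∘ (· + 1))).sum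
        = f 0 * ((List.range (M + 1)).map (fun (k : Nat) => ((List.range (k + 1)).map (fun (j : Nat) => f ((j : Int) + 1))).prod)).sum := by
      rw [← List.sum_map_mul_left]
      apply congrArg
      apply List.map_congr_left
      intro k _
      simp only [Function.comp]
      exact hP k
    rw [hmap1, ih']
    have hmap2 : (List.range (M + 1)).map ((fun (k : Nat) => f (k : Int)) ∘ (· + 1))
        = (List.range (M + 1)).map (fun (k : Nat) => f ((k : Int) + 1)) := by
      apply List.map_congr_left
      intro k _
      simp only [Function.comp]
      norm_cast
    rw [hmap2]
    simp
    ring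

lemma horner_reverse (l : List Int) :
    l.reverse.foldl (fun total c => c * (1 + total)) 0 = l.foldr (fun c t => c * (1 + t)) 0 := by
  rw [List.foldl_reverse]

-- ===== VERDICT (by name: the statement is the Claim_ definition above) =====
theorem nodes_per_tree_spec : Claim_equal_nodes_per_tree := by
  intro val_dict ordering include_last _ hpre
  obtain ⟨hne, -, -⟩ := hpre
  unfold Spec_nodes_per_tree nodes_per_tree nodes_per_tree_alt
  simp only [List.nil_append]
  set d := PySem.Dict.ofList val_dict with hd
  set f : Int → Int := fun i => (((d.get? (PySem.List.pyGetD ordering i "")).getD []).length : Int) with hf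
  have hn : 1 ≤ (ordering.length : Int) := by
    have : ordering.length ≠ 0 := by simpa [List.length_eq_zero_iff] using hne
    omega
  set levelsA : Int := if !include_last then (ordering.length : Int) - 1 else (ordering.length : Int) with hla
  set levelsB : Int := if include_last then (ordering.length : Int) else (ordering.length : Int) - 1 with hlb
  have hlab : levelsA = levelsB := by cases include_last <;> simp [hla, hlb]
  have hlev0 : 0 ≤ levelsB := by rw [hlb]; split <;> omega
  set L : Int := max 1 levelsB with hL
  have hL1 : 1 ≤ L := le_max_left _ _
  set M : Nat := (L - 1).toNat with hM
  have hLM : L = 1 + (M : Int) := by omega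
  have hrangeA : PySem.List.pyRange 1 levelsA 1 = PySem.List.pyRange 1 L 1 := by
    rw [hlab]
    rcases le_or_gt levelsB 1 with h | h
    · have : L = 1 := by omega
      rw [this, PySem.List.pyRange_one_eq_nil (by omega), PySem.List.pyRange_one_eq_nil (by omega)]
    · have : L = levelsB := by omega
      rw [this]
  rw [hrangeA, hLM, nodesList f M, sumPP M f, horner_reverse]
  congr 1
  rw [PySem.List.pyRange_one (a := 0) (b := 1 + (M : Int))]
  rw [show ((1 + (M : Int)) - 0).toNat = M + 1 by omega]
  rw [List.map_map]
  apply List.map_congr_left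
  intro k _
  simp
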